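-- pv_equiv track=rewrite | github.com/JetQuant/mireska | vk_bot.py | get_href
-- ===== SOURCE A (Python) =====
-- def get_href(string_line):
--
--     result = ""
--     flag = 0
--
--     for i in list(string_line):
--
--         if i == "/":
--             flag += 1
--
--         elif flag == 3:
--             result += i
--
--     return result
-- ===== SOURCE B (Python) =====
-- def get_href(string_line):
--     parts = string_line.split("/")
--     return parts[3] if len(parts) > 3 else ""
-- ===== Notes on version B (the rewrite author's own statement) =====
-- stated objective: simpler
-- what changed: Replaces the flag-counting per-character accumulator loop with a single split('/') plus constant-index selection of field 3 (empty string if fewer than four fields).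
import Mathlib
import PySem

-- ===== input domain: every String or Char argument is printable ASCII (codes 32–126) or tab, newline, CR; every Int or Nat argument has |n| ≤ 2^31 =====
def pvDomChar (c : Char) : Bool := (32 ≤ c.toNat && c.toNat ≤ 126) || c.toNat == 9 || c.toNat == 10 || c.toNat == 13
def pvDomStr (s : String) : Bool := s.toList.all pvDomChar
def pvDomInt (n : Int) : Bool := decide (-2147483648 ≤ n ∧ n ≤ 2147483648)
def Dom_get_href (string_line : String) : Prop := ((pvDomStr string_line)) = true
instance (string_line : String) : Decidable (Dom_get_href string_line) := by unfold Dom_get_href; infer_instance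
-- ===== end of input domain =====

-- B replaces A's flag-counting per-character accumulator with split('/') and constant-index selection of field 3 (simpler).

-- ===== PORT A =====
-- the for-loop of A: state (result, flag), one step per character
def getHrefLoopA : List Char → List Char → Int → List Char
  | [], result, _ => result
  | i :: t, result, flag =>
    if i = '/' then getHrefLoopA t result (flag + 1)
    else if flag = 3 then getHrefLoopA t (result ++ [i]) flag
    else getHrefLoopA t result flag

def get_href (string_line : String) : String :=
  String.ofList (getHrefLoopA string_line.toList [] 0)

-- ===== PORT B =====
def get_href_alt (string_line : String) : String :=
  let parts := (string_line.toList.splitOn '/').map String.ofList   -- string_line.split("/"), single-char separator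
  if h : 3 < parts.length then parts[3] else ""

-- ===== PRECONDITION & SPEC =====
def Spec_get_href (string_line : String) (out : String) : Prop := out = get_href_alt string_line
instance (string_line : String) (out : String) : Decidable (Spec_get_href string_line out) := by unfold Spec_get_href; infer_instance

-- ===== CLAIM (what is proved, stated in full; the proofs are below) =====
def Claim_equal_get_href : Prop := ∀ (string_line : String), Dom_get_href string_line → Spec_get_href string_line (get_href string_line)

-- ===== LEMMAS AND PROOFS =====

-- proof helper: the characters A's loop appends when entered with a given flag
def pick : Int → List Char → List Char
  | _, [] => []
  | flag, c :: t =>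
    if c = '/' then pick (flag + 1) t
    else if flag = 3 then c :: pick flag t
    else pick flag t

theorem getHrefLoopA_eq_pick (l : List Char) : ∀ res flag,
    getHrefLoopA l res flag = res ++ pick flag l := by
  induction l with
  | nil => intro res flag; simp [getHrefLoopA, pick]
  | cons c t ih =>
    intro res flag
    by_cases hc : c = '/'
    · simp [getHrefLoopA, pick, hc, ih]
    · by_cases hf : flag = 3 <;> simp [getHrefLoopA, pick, hc, hf, ih]

theorem pick_of_big (l : List Char) : ∀ flag : Int, 4 ≤ flag → pick flag l = [] := by
  induction l with
  | nil => intro flag _; rfl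
  | cons c t ih =>
    intro flag h
    by_cases hc : c = '/'
    · simpa [pick, hc] using ih (flag + 1) (by omega)
    · have hf : flag ≠ 3 := by omega
      simpa [pick, hc, hf] using ih flag h

theorem pick_eq_field (l : List Char) : ∀ k : Nat, k ≤ 3 →
    pick (k : Int) l = (l.splitOn '/').getD (3 - k) [] := by
  induction l with
  | nil =>
    intro k hk
    interval_cases k <;> simp [pick, List.splitOn]
  | cons c t ih =>
    intro k hk
    by_cases hc : c = '/'
    · subst hc
      rcases Nat.lt_or_ge k 3 with hk3 | hk3
      · have := ih (k + 1) (by omega)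
        push_cast at this
        simp only [pick, List.splitOn, List.splitOnP_cons, beq_self_eq_true,
          if_pos trivial] at this ⊢
        rw [this]
        have : 3 - k = (3 - (k + 1)) + 1 := by omega
        simp [this]
      · have hk' : k = 3 := by omega
        subst hk'
        simp [pick, List.splitOn, List.splitOnP_cons]
        exact pick_of_big t 4 (by norm_num)
    · have hne : (c == '/') = false := by simpa using hc
      have hnn : (t.splitOn '/') ≠ [] := List.splitOnP_ne_nil _ t
      rcases Nat.lt_or_ge k 3 with hk3 | hk3
      · have hkne : ((k : Int) = 3) = False := by simp; omega
        have hpos : 1 ≤ 3 - k := by omega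
        simp only [pick, hc, hkne, if_false]
        rw [ih k (by omega)]
        obtain ⟨p, ps, hps⟩ := List.exists_cons_of_ne_nil hnn
        simp only [List.splitOn] at hps ⊢
        rw [hps, List.splitOnP_cons, if_neg (by simp [hne]), hps]
        rcases Nat.exists_eq_add_of_le hpos with ⟨m, hm⟩
        have hm' : 3 - k = m + 1 := by omega
        rw [hm']
        simp [List.getD]
      · have hk' : k = 3 := by omega
        subst hk'
        obtain ⟨p, ps, hps⟩ := List.exists_cons_of_ne_nil hnn
        have h0 := ih 3 le_rfl
        simp only [List.splitOn] at h0 hps ⊢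
        rw [hps] at h0
        rw [List.splitOnP_cons, if_neg (by simp [hne]), hps]
        norm_num [List.getD] at h0
        push_cast
        simp [pick, hc, h0]

-- ===== VERDICT (by name: the statement is the Claim_ definition above) =====
theorem get_href_spec : Claim_equal_get_href := by
  intro s _
  unfold Spec_get_href get_href get_href_alt
  rw [getHrefLoopA_eq_pick, List.nil_append]
  have h := pick_eq_field s.toList 0 (by omega)
  norm_num at h
  rw [h]
  set ps := s.toList.splitOn '/' with hps
  by_cases h3 : 3 < ps.length
  · simp [h3]
  · simp [h3]
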